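-- pv_equiv track=rewrite | github.com/Ramezramo/pythonfiles4 | WINDOWS/amazon scraper flutter api/_13_2_adding_comma_to_the_price.py | adding_comma
-- ===== SOURCE A (Python) =====
-- def adding_comma(_num):#added 13.2
-- 	NUM_LEN =len(_num)
-- 	if NUM_LEN == 4:
-- 		num_added_comma = ""
-- 		counter66 = 0
-- 		for i in _num:
-- 			if counter66 == 1:
-- 				num_added_comma += ','
-- 			num_added_comma += i
-- 			counter66 += 1
-- 	elif NUM_LEN == 5:
-- 		num_added_comma = ""
-- 		counter66 = 0
-- 		for i in _num:
-- 			if counter66 == 2: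
-- 				num_added_comma += ','
-- 			num_added_comma += i
-- 			counter66 += 1
-- 	elif NUM_LEN == 6:
-- 		num_added_comma = ""
-- 		counter66 = 0
-- 		for i in _num:
-- 			if counter66 == 3:
-- 				num_added_comma += ','
-- 			num_added_comma += i
-- 			counter66 += 1
-- 	elif NUM_LEN == 7:
-- 		num_added_comma = ""
-- 		counter66 = 0
-- 		for i in _num:
-- 			if counter66 == 1:
-- 				num_added_comma += ','
-- 			num_added_comma += i
-- 			counter66 += 1
--
--
-- 	else:
-- 		num_added_comma =_num
--
--
-- 	return num_added_comma#added 13.2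
-- ===== SOURCE B (Python) =====
-- def adding_comma(_num):
--     pos = {4: 1, 5: 2, 6: 3, 7: 1}.get(len(_num))
--     if pos is None:
--         return _num
--     return _num[:pos] + ',' + _num[pos:]
-- ===== Notes on version B (the rewrite author's own statement) =====
-- stated objective: simpler
-- what changed: Replaces A's four duplicated per-character accumulation loops with a length-to-insertion-index table lookup and a single slice-and-concatenate.
import Mathlib
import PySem

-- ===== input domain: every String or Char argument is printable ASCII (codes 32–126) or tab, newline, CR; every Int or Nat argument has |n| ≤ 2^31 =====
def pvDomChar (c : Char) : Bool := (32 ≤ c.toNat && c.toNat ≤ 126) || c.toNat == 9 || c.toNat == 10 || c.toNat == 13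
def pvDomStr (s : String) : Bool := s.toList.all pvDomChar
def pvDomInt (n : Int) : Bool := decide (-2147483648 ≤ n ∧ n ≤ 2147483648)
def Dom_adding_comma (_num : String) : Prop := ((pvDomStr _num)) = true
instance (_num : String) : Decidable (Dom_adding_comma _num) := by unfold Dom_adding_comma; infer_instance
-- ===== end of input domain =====

-- B replaces A's four duplicated per-character accumulation loops with a
-- length→insertion-index table lookup and one slice-and-concatenate (simpler).

-- ===== PORT A =====
-- the body of each of A's four identical for-loops, parameterised by the counter value k
def commaLoop (cs : List Char) (k : Nat) : List Char :=
  (cs.foldl (fun (st : List Char × Nat) c =>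
      (st.1 ++ (if st.2 = k then [','] else []) ++ [c], st.2 + 1)) ([], 0)).1

def adding_comma (_num : String) : String :=
  let n := PySem.Str.len _num
  if n = 4 then String.ofList (commaLoop _num.toList 1)
  else if n = 5 then String.ofList (commaLoop _num.toList 2)
  else if n = 6 then String.ofList (commaLoop _num.toList 3)
  else if n = 7 then String.ofList (commaLoop _num.toList 1)
  else _num

-- ===== PORT B =====
def adding_comma_alt (_num : String) : String :=
  match PySem.Dict.get? (PySem.Dict.ofList [((4:Int), (1:Int)), (5, 2), (6, 3), (7, 1)])
      (PySem.Str.len _num) with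
  | none => _num
  | some p =>
      String.ofList (PySem.List.slice _num.toList none (some p) ++
        ',' :: PySem.List.slice _num.toList (some p) none)

-- ===== PRECONDITION & SPEC =====
def Spec_adding_comma (_num : String) (out : String) : Prop := out = adding_comma_alt _num
instance (_num : String) (out : String) : Decidable (Spec_adding_comma _num out) := by unfold Spec_adding_comma; infer_instance

-- ===== CLAIM (what is proved, stated in full; the proofs are below) =====
def Claim_equal_adding_comma : Prop := ∀ (_num : String), Dom_adding_comma _num → Spec_adding_comma _num (adding_comma _num)

-- ===== LEMMAS AND PROOFS =====

lemma commaLoop_after (cs : List Char) (k i : Nat) (acc : List Char) (h : k < i) :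
    cs.foldl (fun (st : List Char × Nat) c =>
      (st.1 ++ (if st.2 = k then [','] else []) ++ [c], st.2 + 1)) (acc, i)
    = (acc ++ cs, i + cs.length) := by
  induction cs generalizing i acc with
  | nil => simp
  | cons c cs ih =>
      have hne : ¬ i = k := by omega
      simp only [List.foldl_cons, hne]
      rw [ih (i + 1) _ (by omega)]
      simp
      omega

lemma commaLoop_before (cs : List Char) (k i : Nat) (acc : List Char)
    (h1 : i ≤ k) (h2 : k - i < cs.length) :
    cs.foldl (fun (st : List Char × Nat) c =>
      (st.1 ++ (if st.2 = k then [','] else []) ++ [c], st.2 + 1)) (acc, i)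
    = (acc ++ cs.take (k - i) ++ ',' :: cs.drop (k - i), i + cs.length) := by
  induction cs generalizing i acc with
  | nil => simp at h2
  | cons c cs ih =>
      by_cases hk : i = k
      · subst hk
        simp only [List.foldl_cons]
        rw [commaLoop_after cs i (i + 1) _ (by omega)]
        simp
        omega
      · have hlt : i < k := by omega
        simp only [List.foldl_cons, if_neg hk]
        rw [ih (i + 1) _ (by omega) (by simp at h2 ⊢; omega)]
        have ht : (c :: cs).take (k - i) = c :: cs.take (k - i - 1) := by
          have : k - i = (k - i - 1) + 1 := by omega
          rw [this]; simp
        have hd : (c :: cs).drop (k - i) = cs.drop (k - i - 1) := by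
          have : k - i = (k - i - 1) + 1 := by omega
          rw [this]; simp
        rw [ht, hd]
        simp
        constructor
        · have : k - (i + 1) = k - i - 1 := by omega
          rw [this]
        · omega

lemma commaLoop_eq (cs : List Char) (k : Nat) (h : k < cs.length) :
    commaLoop cs k = cs.take k ++ ',' :: cs.drop k := by
  unfold commaLoop
  rw [commaLoop_before cs k 0 [] (by omega) (by omega)]
  simp

-- ===== VERDICT (by name: the statement is the Claim_ definition above) =====
theorem adding_comma_spec : Claim_equal_adding_comma := by
  intro s _
  unfold Spec_adding_comma adding_comma adding_comma_alt
  have hlen : PySem.Str.len s = (s.toList.length : Int) := by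
    simp [PySem.Str.len_eq]
  rw [hlen]
  by_cases h4 : s.toList.length = 4
  · rw [h4]
    rw [show PySem.Dict.get? (PySem.Dict.ofList [((4:Int), (1:Int)), (5, 2), (6, 3), (7, 1)])
        (((4:Nat)):Int) = some 1 from by decide]
    rw [commaLoop_eq _ 1 (by omega)]
    simp [PySem.List.slice_to, PySem.List.slice_from]
  · by_cases h5 : s.toList.length = 5
    · rw [h5]
      rw [show PySem.Dict.get? (PySem.Dict.ofList [((4:Int), (1:Int)), (5, 2), (6, 3), (7, 1)])
          (((5:Nat)):Int) = some 2 from by decide]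
      rw [commaLoop_eq _ 2 (by omega)]
      simp [PySem.List.slice_to, PySem.List.slice_from]
    · by_cases h6 : s.toList.length = 6
      · rw [h6]
        rw [show PySem.Dict.get? (PySem.Dict.ofList [((4:Int), (1:Int)), (5, 2), (6, 3), (7, 1)])
            (((6:Nat)):Int) = some 3 from by decide]
        rw [commaLoop_eq _ 3 (by omega)]
        simp [PySem.List.slice_to, PySem.List.slice_from]
      · by_cases h7 : s.toList.length = 7
        · rw [h7]
          rw [show PySem.Dict.get? (PySem.Dict.ofList [((4:Int), (1:Int)), (5, 2), (6, 3), (7, 1)])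
              (((7:Nat)):Int) = some 1 from by decide]
          rw [commaLoop_eq _ 1 (by omega)]
          simp [PySem.List.slice_to, PySem.List.slice_from]
        · have c4 : ¬ ((s.toList.length : Int) = 4) := fun h => h4 (by exact_mod_cast h)
          have c5 : ¬ ((s.toList.length : Int) = 5) := fun h => h5 (by exact_mod_cast h)
          have c6 : ¬ ((s.toList.length : Int) = 6) := fun h => h6 (by exact_mod_cast h)
          have c7 : ¬ ((s.toList.length : Int) = 7) := fun h => h7 (by exact_mod_cast h)
          rw [if_neg c4, if_neg c5, if_neg c6, if_neg c7]
          have hnone : PySem.Dict.get? (PySem.Dict.ofList [((4:Int), (1:Int)), (5, 2), (6, 3), (7, 1)])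
              ((s.toList.length : Int)) = none := by
            rw [show (PySem.Dict.ofList [((4:Int), (1:Int)), (5, 2), (6, 3), (7, 1)])
                = PySem.Dict.mk [((4:Int), (1:Int)), (5, 2), (6, 3), (7, 1)] from by decide]
            have k4 : ¬ ((4:Int) = (s.toList.length : Int)) := fun h => c4 h.symm
            have k5 : ¬ ((5:Int) = (s.toList.length : Int)) := fun h => c5 h.symm
            have k6 : ¬ ((6:Int) = (s.toList.length : Int)) := fun h => c6 h.symm
            have k7 : ¬ ((7:Int) = (s.toList.length : Int)) := fun h => c7 h.symm
            simp only [PySem.Dict.get?_mk_cons]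
            have hsl : (s.length : Int) = (s.toList.length : Int) := by simp
            split_ifs <;> simp_all [PySem.Dict.get?]
          rw [hnone]
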